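-- pv_equiv track=rewrite | github.com/martrik/UCL_CS | Term1/Theory/Part1/3.py | ticketsNumbersUntilPosition
-- ===== SOURCE A (Python) =====
-- def ticketsNumbersUntilPosition(first, position):
--     tickets = [first]
--     for i in range(position-1):
--         tickets.append((tickets[-1]*31334)%31337)
--
--     bigger = 0
--     number = tickets[position-1]
--
--     for t in range(len(tickets)-1):
--         if (number >= tickets[t]): bigger += 1
--
--     return bigger+1
-- ===== SOURCE B (Python) =====
-- def ticketsNumbersUntilPosition(first, position):
--     # Sort-then-binary-search: bisect_right over a sorted copy of the tickets
--     # counts ALL tickets <= number; since the final ticket IS number, that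
--     # equals A's bigger+1. Replaces A's linear counting scan.
--     tickets = [first]
--     x = first
--     for _ in range(position - 1):
--         x = x * 31334 % 31337
--         tickets.append(x)
--     number = tickets[position - 1]
--     s = sorted(tickets)
--     lo, hi = 0, len(s)
--     while lo < hi:
--         mid = (lo + hi) // 2
--         if number < s[mid]:
--             hi = mid
--         else:
--             lo = mid + 1
--     return lo
-- ===== Notes on version B (the rewrite author's own statement) =====
-- stated objective: alternative
-- what changed: B replaces A's linear scan over earlier tickets with sort-then-binary-search: it sorts a copy of the tickets and returns the bisect_right insertion point of the final ticket, which equals A's bigger+1 because the final ticket equals number so counting all tickets <= number counts the scan's hits plus one.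
import Mathlib
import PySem

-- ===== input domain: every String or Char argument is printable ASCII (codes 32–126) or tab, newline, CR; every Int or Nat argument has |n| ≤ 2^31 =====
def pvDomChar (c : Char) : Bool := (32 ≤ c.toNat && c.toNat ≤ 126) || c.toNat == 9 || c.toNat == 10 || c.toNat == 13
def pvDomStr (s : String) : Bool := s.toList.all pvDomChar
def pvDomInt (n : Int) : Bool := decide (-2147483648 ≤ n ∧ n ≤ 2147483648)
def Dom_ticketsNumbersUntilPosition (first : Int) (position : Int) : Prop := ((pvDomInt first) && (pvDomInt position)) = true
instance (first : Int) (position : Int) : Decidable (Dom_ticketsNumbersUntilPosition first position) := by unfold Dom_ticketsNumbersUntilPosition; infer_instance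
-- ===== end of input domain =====

-- B replaces A's linear counting scan with sort-then-binary-search (hand-written bisect_right); objective: alternative.
-- Both ports model the Python list `tickets` as an Array (append = push, O(1) like Python's append);
-- pyGetDArr is Python's xs[i] with negative-index wraparound, exact whenever the index is in range
-- (every access here is; out-of-range positions are excluded by Pre_).

-- ===== PORT A =====
def pyGetDArr (a : Array Int) (i : Int) (d : Int) : Int :=
  let j := if i < 0 then i + a.size else i
  if 0 ≤ j ∧ j < a.size then a.getD j.toNat d else d

def ticketsNumbersUntilPosition (first : Int) (position : Int) : Int :=
  let tickets := (PySem.List.pyRange 0 (position - 1) 1).foldl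
      (fun ts _ => ts.push (PySem.Int.mod (pyGetDArr ts (-1) 0 * 31334) 31337)) #[first]
  let number := pyGetDArr tickets (position - 1) 0
  let bigger := (PySem.List.pyRange 0 ((tickets.size : Int) - 1) 1).foldl
      (fun bigger t => if number ≥ pyGetDArr tickets t 0 then bigger + 1 else bigger) 0
  bigger + 1

-- ===== PORT B =====
-- hand-written bisect_right loop of Source B, transliterated (mid always in range, so getD never hits its default)
def pvBisect (s : List Int) (x : Int) (lo hi : Nat) : Nat :=
  if lo < hi then
    let mid := (lo + hi) / 2
    if x < s.getD mid 0 then pvBisect s x lo mid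
    else pvBisect s x (mid + 1) hi
  else lo
termination_by hi - lo
decreasing_by all_goals omega

-- Source B's sorted(tickets) — a builtin — is ported as the stable mergeSort on ≤
def ticketsNumbersUntilPosition_alt (first : Int) (position : Int) : Int :=
  let tx := (PySem.List.pyRange 0 (position - 1) 1).foldl
      (fun (tx : Array Int × Int) _ =>
        let x := PySem.Int.mod (tx.2 * 31334) 31337
        (tx.1.push x, x)) (#[first], first)
  let tickets := tx.1
  let number := pyGetDArr tickets (position - 1) 0
  let s := tickets.toList.mergeSort (fun a b => a ≤ b)
  ((pvBisect s number 0 s.length : Nat) : Int)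

-- ===== PRECONDITION & SPEC =====
-- A raises IndexError (tickets[position-1] on the 1-element list) for every position < 0; nothing else is excluded.
def Pre_ticketsNumbersUntilPosition (first : Int) (position : Int) : Prop := 0 ≤ position
instance (first : Int) (position : Int) : Decidable (Pre_ticketsNumbersUntilPosition first position) := by unfold Pre_ticketsNumbersUntilPosition; infer_instance
def pvWitness_ticketsNumbersUntilPosition : Int × Int := (5, 3)

def Spec_ticketsNumbersUntilPosition (first : Int) (position : Int) (out : Int) : Prop := out = ticketsNumbersUntilPosition_alt first position
instance (first : Int) (position : Int) (out : Int) : Decidable (Spec_ticketsNumbersUntilPosition first position out) := by unfold Spec_ticketsNumbersUntilPosition; infer_instance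

-- ===== CLAIM (what is proved, stated in full; the proofs are below) =====
def Claim_equal_ticketsNumbersUntilPosition : Prop := ∀ (first : Int) (position : Int), Dom_ticketsNumbersUntilPosition first position → Pre_ticketsNumbersUntilPosition first position → Spec_ticketsNumbersUntilPosition first position (ticketsNumbersUntilPosition first position)

-- ===== LEMMAS AND PROOFS =====

-- pyGetDArr is PySem's Python indexing on the array's list of elements
theorem pyGetDArr_toList (a : Array Int) (i d : Int) :
    pyGetDArr a i d = PySem.List.pyGetD a.toList i d := by
  simp only [pyGetDArr, PySem.List.pyGetD, PySem.List.pyGet?, PySem.List.pyIdx?,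
    Array.length_toList]
  by_cases h0 : i < 0
  · simp only [h0, if_true, if_neg (by omega : ¬ 0 ≤ i)]
    by_cases h1 : 0 ≤ i + a.size ∧ i + a.size < a.size
    · rw [if_pos h1, if_pos (by omega : -(a.size : Int) ≤ i)]
      have h2 : a.size - (-i).toNat = (i + a.size).toNat := by omega
      rw [h2, Array.getD_eq_getD_getElem?]
      simp
    · rw [if_neg h1, if_neg (by omega : ¬ -(a.size : Int) ≤ i)]; simp
  · simp only [h0, if_false, if_pos (by omega : 0 ≤ i)]
    by_cases h1 : 0 ≤ i ∧ i < a.size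
    · rw [if_pos h1, if_pos (by omega : i < (a.size : Int)), Array.getD_eq_getD_getElem?]
      simp
    · rw [if_neg h1, if_neg (by omega : ¬ i < (a.size : Int))]; simp

-- the LCG iterate: itf first k = the k-th ticket
def itf (first : Int) : Nat → Int
  | 0 => first
  | k + 1 => PySem.Int.mod (itf first k * 31334) 31337

-- A's generation loop builds exactly the first n+1 iterates
theorem ticketsA_eq (first : Int) (n : Nat) :
    ((PySem.List.pyRange 0 (n : Int) 1).foldl
      (fun ts _ => ts.push (PySem.Int.mod (pyGetDArr ts (-1) 0 * 31334) 31337)) #[first]).toList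
      = (List.range (n + 1)).map (itf first) := by
  induction n with
  | zero => simp [PySem.List.pyRange_one_eq_nil, itf]
  | succ n ih =>
    have h : ((n + 1 : Nat) : Int) = (n : Int) + 1 := by push_cast; ring
    rw [h, PySem.List.pyRange_one_succ_right (by positivity), List.foldl_append]
    simp only [List.foldl_cons, List.foldl_nil]
    rw [Array.toList_push, pyGetDArr_toList, ih]
    have hsplit : (List.range (n + 1)).map (itf first)
        = (List.range n).map (itf first) ++ [itf first n] := by simp [List.range_succ]
    rw [hsplit, PySem.List.pyGetD_neg_one_append_singleton]
    simp [List.range_succ, itf]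

-- B's generation loop: running pair (tickets array so far, current ticket)
theorem ticketsB_eq (first : Int) (n : Nat) :
    ((PySem.List.pyRange 0 (n : Int) 1).foldl
      (fun (tx : Array Int × Int) _ =>
        let x := PySem.Int.mod (tx.2 * 31334) 31337
        (tx.1.push x, x)) (#[first], first)).1.toList = (List.range (n + 1)).map (itf first)
    ∧ ((PySem.List.pyRange 0 (n : Int) 1).foldl
      (fun (tx : Array Int × Int) _ =>
        let x := PySem.Int.mod (tx.2 * 31334) 31337
        (tx.1.push x, x)) (#[first], first)).2 = itf first n := by
  induction n with
  | zero => simp [PySem.List.pyRange_one_eq_nil, itf]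
  | succ n ih =>
    have h : ((n + 1 : Nat) : Int) = (n : Int) + 1 := by push_cast; ring
    rw [h, PySem.List.pyRange_one_succ_right (by positivity), List.foldl_append]
    simp only [List.foldl_cons, List.foldl_nil]
    refine ⟨?_, ?_⟩
    · rw [Array.toList_push, ih.1, ih.2]
      simp [List.range_succ, itf]
    · rw [ih.2]; simp [itf]

-- A's counting loop over the first k indices of the iterate list
theorem countA_eq (first num : Int) (n : Nat) : ∀ (k : Nat) (c : Int), k ≤ n + 1 →
    (PySem.List.pyRange 0 (k : Int) 1).foldl
      (fun b t => if num ≥ PySem.List.pyGetD ((List.range (n + 1)).map (itf first)) t 0 then b + 1 else b) c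
      = c + ((List.range k).countP (fun i => decide (itf first i ≤ num)) : Int) := by
  intro k
  induction k with
  | zero => intro c _; simp [PySem.List.pyRange_one_eq_nil]
  | succ k ih =>
    intro c hk
    have h : ((k + 1 : Nat) : Int) = (k : Int) + 1 := by push_cast; ring
    have hval : PySem.List.pyGetD ((List.range (n + 1)).map (itf first)) ((k : Nat) : Int) 0
        = itf first k := by
      simp [List.getD_eq_getElem?_getD, List.getElem?_map, List.getElem?_range (by omega : k < n + 1)]
    rw [h, PySem.List.pyRange_one_succ_right (by positivity), List.foldl_append,
      ih c (by omega)]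
    simp only [List.foldl_cons, List.foldl_nil, hval, ge_iff_le]
    rw [List.range_succ, List.countP_append]
    simp only [List.countP_cons, List.countP_nil]
    split_ifs <;> simp_all <;> omega

-- in a ≤-sorted list, the elements ≤ x are exactly the first countP of them
theorem sorted_le_iff_lt_countP (s : List Int) (x : Int)
    (hs : s.Pairwise (· ≤ ·)) : ∀ (i : Nat) (hi : i < s.length),
    (s[i] ≤ x ↔ i < s.countP (fun a => decide (a ≤ x))) := by
  induction s with
  | nil => intro i hi; simp at hi
  | cons a t ih =>
    intro i hi
    rcases List.pairwise_cons.mp hs with ⟨ha, ht⟩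
    by_cases hax : a ≤ x
    · cases i with
      | zero => simp [List.countP_cons, hax]
      | succ i =>
        have := ih ht i (by simpa using hi)
        simp only [List.getElem_cons_succ, List.countP_cons, hax]
        simpa [Nat.succ_lt_succ_iff] using this
    · have hall : t.countP (fun a => decide (a ≤ x)) = 0 := by
        rw [List.countP_eq_zero]
        intro b hb
        simp only [decide_eq_true_eq]
        intro hbx; exact hax (le_trans (ha b hb) hbx)
      have : (a :: t).countP (fun a => decide (a ≤ x)) = 0 := by
        simp [List.countP_cons, hax, hall]
      rw [this]
      simp only [Nat.not_lt_zero, iff_false]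
      cases i with
      | zero => simpa using hax
      | succ i =>
        intro hle
        have hi' : i < t.length := by simpa using hi
        exact hax (le_trans (ha _ (List.getElem_mem hi')) (by simpa using hle))

-- the binary-search loop, run on lo..hi bracketing c = countP, returns c
theorem pvBisect_eq (s : List Int) (x : Int) (hs : s.Pairwise (· ≤ ·)) :
    ∀ (m lo hi : Nat), hi - lo = m → hi ≤ s.length →
      lo ≤ s.countP (fun a => decide (a ≤ x)) → s.countP (fun a => decide (a ≤ x)) ≤ hi →
      pvBisect s x lo hi = s.countP (fun a => decide (a ≤ x)) := by
  intro m
  induction m using Nat.strong_induction_on with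
  | _ m ih =>
    intro lo hi hm hlen hlo hhi
    rw [pvBisect]
    by_cases h : lo < hi
    · simp only [h, if_true]
      have hmid : (lo + hi) / 2 < s.length := by omega
      have hget : s.getD ((lo + hi) / 2) 0 = s[(lo + hi) / 2] := by
        rw [List.getD_eq_getElem?_getD, List.getElem?_eq_getElem hmid]; rfl
      rw [hget]
      by_cases hx : x < s[(lo + hi) / 2]
      · simp only [hx, if_true]
        have hc : s.countP (fun a => decide (a ≤ x)) ≤ (lo + hi) / 2 := by
          by_contra hc
          exact absurd ((sorted_le_iff_lt_countP s x hs _ hmid).mpr (by omega)) (by omega)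
        exact ih ((lo + hi) / 2 - lo) (by omega) lo ((lo + hi) / 2) rfl (by omega) hlo hc
      · simp only [hx, if_false]
        have hc : (lo + hi) / 2 < s.countP (fun a => decide (a ≤ x)) :=
          (sorted_le_iff_lt_countP s x hs _ hmid).mp (by omega)
        exact ih (hi - ((lo + hi) / 2 + 1)) (by omega) ((lo + hi) / 2 + 1) hi rfl hlen (by omega) hhi
    · simp only [h, if_false]; omega

-- ===== VERDICT (by name: the statement is the Claim_ definition above) =====
theorem ticketsNumbersUntilPosition_spec : Claim_equal_ticketsNumbersUntilPosition := by
  intro first position _ hpre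
  simp only [Spec_ticketsNumbersUntilPosition, ticketsNumbersUntilPosition,
    ticketsNumbersUntilPosition_alt]
  obtain ⟨p, rfl⟩ := Int.eq_ofNat_of_zero_le hpre
  -- common core: both sides over an array tk holding the first n+1 iterates, with num its last entry
  have key : ∀ (n : Nat) (tkA tkB : Array Int) (numA numB : Int),
      tkA.toList = (List.range (n + 1)).map (itf first) → tkB.toList = tkA.toList →
      numA = itf first n → numB = itf first n →
      (((PySem.List.pyRange 0 ((tkA.size : Int) - 1) 1).foldl
          (fun b t => if numA ≥ pyGetDArr tkA t 0 then b + 1 else b) 0) + 1 : Int)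
        = ((pvBisect (tkB.toList.mergeSort (fun a b => a ≤ b)) numB 0
              (tkB.toList.mergeSort (fun a b => a ≤ b)).length : Nat) : Int) := by
    intro n tkA tkB numA numB htk htkB hnumA hnumB
    subst hnumA; subst hnumB
    have hsize : ((tkA.size : Int) - 1) = (n : Int) := by
      have := congrArg List.length htk
      simp at this; omega
    have hfun : (fun (b : Int) (t : Int) => if itf first n ≥ pyGetDArr tkA t 0 then b + 1 else b)
        = (fun b t => if itf first n ≥ PySem.List.pyGetD ((List.range (n + 1)).map (itf first)) t 0 then b + 1 else b) := by
      funext b t; rw [pyGetDArr_toList, htk]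
    rw [hsize, hfun, countA_eq first (itf first n) n n 0 (by omega)]
    set s := tkB.toList.mergeSort (fun a b => a ≤ b) with hsdef
    have hs : s.Pairwise (· ≤ ·) := by
      refine (List.pairwise_mergeSort ?_ ?_ tkB.toList).imp (fun h => of_decide_eq_true h)
      · intro a b c hab hbc; simp only [decide_eq_true_eq] at *; omega
      · intro a b; simp only [Bool.or_eq_true, decide_eq_true_eq]; omega
    have hperm : s.Perm ((List.range (n + 1)).map (itf first)) := by
      rw [hsdef, ← htk, ← htkB]; exact List.mergeSort_perm _ _
    have hcnt : s.countP (fun a => decide (a ≤ itf first n))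
        = (List.range (n + 1)).countP (fun i => decide (itf first i ≤ itf first n)) := by
      rw [hperm.countP_eq, List.countP_map]; rfl
    have hslen : s.length = n + 1 := by
      rw [hperm.length_eq]; simp
    rw [pvBisect_eq s (itf first n) hs (s.length - 0) 0 s.length rfl le_rfl (by omega)
        List.countP_le_length, hcnt]
    rw [List.range_succ, List.countP_append]
    simp
  cases p with
  | zero =>
    have h0 : ((0 : Nat) : Int) - 1 = (-1 : Int) := by norm_num
    rw [h0, PySem.List.pyRange_one_eq_nil (by omega : (-1 : Int) ≤ 0)]
    simp only [List.foldl_nil]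
    refine key 0 _ _ _ _ (by simp [itf]) (by simp) ?_ ?_ <;>
      · rw [pyGetDArr_toList]
        simp [PySem.List.pyGetD, PySem.List.pyGet?, PySem.List.pyIdx?, itf]
  | succ n =>
    have h1 : ((n + 1 : Nat) : Int) - 1 = (n : Int) := by push_cast; ring
    rw [h1]
    have hA := ticketsA_eq first n
    have hB := ticketsB_eq first n
    refine key n _ _ _ _ hA (by rw [hB.1, hA]) ?_ ?_ <;>
      · first
        | (rw [pyGetDArr_toList, hA]
           simp [PySem.List.pyGetD_natCast, List.getD_eq_getElem?_getD,
             List.getElem?_range (by omega : n < n + 1)])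
        | (rw [pyGetDArr_toList, hB.1]
           simp [PySem.List.pyGetD_natCast, List.getD_eq_getElem?_getD,
             List.getElem?_range (by omega : n < n + 1)])
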